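-- pv_equiv track=rewrite | github.com/Osc-7/machiattoBot | src/schedule_agent/core/memory/recall.py | _excerpt_memory_md
-- ===== SOURCE A (Python) =====
-- from typing import Any, Dict, List, Optional, Tuple
--
-- def _excerpt_memory_md(full_text: str, query: str, max_len: int = 1000) -> str:
--     """从 MEMORY.md 中提取与查询相关的段落，或返回截断版本。"""
--     if len(full_text) <= max_len:
--         return full_text
--
--     query_words = query.lower().split()
--     paragraphs = full_text.split("\n\n")
--     scored: List[Tuple[float, str]] = []
--     for para in paragraphs:
--         score = sum(1 for w in query_words if w in para.lower())
--         scored.append((score, para))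
--     scored.sort(key=lambda x: x[0], reverse=True)
--
--     result_parts: List[str] = []
--     total = 0
--     for _, para in scored:
--         if total + len(para) > max_len:
--             break
--         result_parts.append(para)
--         total += len(para)
--
--     return "\n\n".join(result_parts) if result_parts else full_text[:max_len]
-- ===== SOURCE B (Python) =====
-- def _excerpt_memory_md(full_text: str, query: str, max_len: int = 1000) -> str:
--     """Sort-free variant: selection by descending score level over precomputed scores."""
--     if len(full_text) <= max_len:
--         return full_text
--
--     query_words = query.lower().split()
--     paragraphs = full_text.split("\n\n")
--     scores = [sum(1 for w in query_words if w in p.lower()) for p in paragraphs]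
--
--     result_parts = []
--     total = 0
--     stop = False
--     for s in reversed(range(len(query_words) + 1)):
--         for para, sc in zip(paragraphs, scores):
--             if sc != s:
--                 continue
--             if total + len(para) > max_len:
--                 stop = True
--                 break
--             result_parts.append(para)
--             total += len(para)
--         if stop:
--             break
--
--     return "\n\n".join(result_parts) if result_parts else full_text[:max_len]
-- ===== Notes on version B (the rewrite author's own statement) =====
-- stated objective: alternative
-- what changed: Replaces the stable sort of (score, paragraph) pairs by a sort-free selection: paragraph scores are computed once, then score levels are swept from the maximum possible (len(query_words)) down to 0, picking paragraphs of that score in original order, with the same break-on-first-overflow and empty fallback.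
import Mathlib
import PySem

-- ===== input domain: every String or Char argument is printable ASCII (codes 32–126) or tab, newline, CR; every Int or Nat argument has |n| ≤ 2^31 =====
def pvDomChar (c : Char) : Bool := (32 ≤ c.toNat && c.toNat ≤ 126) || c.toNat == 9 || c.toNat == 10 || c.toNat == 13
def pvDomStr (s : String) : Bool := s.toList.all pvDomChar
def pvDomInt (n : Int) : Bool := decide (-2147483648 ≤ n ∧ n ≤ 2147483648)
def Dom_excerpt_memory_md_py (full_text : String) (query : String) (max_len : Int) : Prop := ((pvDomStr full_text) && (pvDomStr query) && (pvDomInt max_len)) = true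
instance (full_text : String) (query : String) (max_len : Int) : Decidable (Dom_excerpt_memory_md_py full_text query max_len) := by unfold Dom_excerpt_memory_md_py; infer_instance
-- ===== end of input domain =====

-- B replaces A's stable sort of (score, paragraph) pairs by a sort-free descending sweep over
-- score levels with scores computed once ("alternative": structurally different, similar cost).

-- ===== PORT A =====

-- sum(1 for w in query_words if w in para.lower())
def pvScoreA (query_words : List String) (para : String) : Int :=
  (query_words.map (fun w => if PySem.Str.isIn w (PySem.Str.lower para) then (1 : Int) else 0)).sum

-- the 'for _, para in scored: …' greedy loop with break; state = (result_parts, total)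
def pvGreedyA (max_len : Int) : List (Int × String) → List String × Int → List String × Int
  | [], st => st
  | (_, para) :: rest, (parts, total) =>
    if total + PySem.Str.len para > max_len then (parts, total)
    else pvGreedyA max_len rest (parts ++ [para], total + PySem.Str.len para)

def excerpt_memory_md_py (full_text : String) (query : String) (max_len : Int) : String :=
  if PySem.Str.len full_text ≤ max_len then full_text
  else
    let query_words := PySem.Str.split₀ (PySem.Str.lower query)
    let paragraphs := (PySem.Str.split? full_text "\n\n").getD []   -- sep is the literal "\n\n" ≠ "", so split? is always some
    let scored := paragraphs.map (fun para => (pvScoreA query_words para, para))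
    let scoredSorted := PySem.List.sorted scored (fun x => x.1) true
    let res := pvGreedyA max_len scoredSorted ([], 0)
    if res.1 ≠ [] then PySem.Str.join "\n\n" res.1
    else PySem.Str.slice full_text none (some max_len)

-- ===== PORT B =====

-- sum(1 for w in query_words if w in p.lower())
def pvScoreB (query_words : List String) (p : String) : Int :=
  (query_words.map (fun w => if PySem.Str.isIn w (PySem.Str.lower p) then (1 : Int) else 0)).sum

-- inner 'for para, sc in zip(paragraphs, scores)' loop; the Bool is the stop flag
def pvInnerB (max_len s : Int) : List (String × Int) → List String × Int → (List String × Int) × Bool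
  | [], st => (st, false)
  | (para, sc) :: rest, (parts, total) =>
    if sc ≠ s then pvInnerB max_len s rest (parts, total)
    else if total + PySem.Str.len para > max_len then ((parts, total), true)
    else pvInnerB max_len s rest (parts ++ [para], total + PySem.Str.len para)

-- outer 'for s in reversed(range(len(query_words) + 1))' loop, broken when stop is set
def pvOuterB (max_len : Int) (zs : List (String × Int)) : List Int → List String × Int → List String × Int
  | [], st => st
  | s :: ss, st =>
    let r := pvInnerB max_len s zs st
    if r.2 then r.1 else pvOuterB max_len zs ss r.1

def excerpt_memory_md_py_alt (full_text : String) (query : String) (max_len : Int) : String :=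
  if PySem.Str.len full_text ≤ max_len then full_text
  else
    let query_words := PySem.Str.split₀ (PySem.Str.lower query)
    let paragraphs := (PySem.Str.split? full_text "\n\n").getD []   -- sep is the literal "\n\n" ≠ "", so split? is always some
    let scores := paragraphs.map (fun p => pvScoreB query_words p)
    let res := pvOuterB max_len (paragraphs.zip scores)
        ((PySem.List.pyRange 0 ((query_words.length : Int) + 1) 1).reverse) ([], 0)
    if res.1 ≠ [] then PySem.Str.join "\n\n" res.1
    else PySem.Str.slice full_text none (some max_len)

-- ===== PRECONDITION & SPEC =====
def Spec_excerpt_memory_md_py (full_text : String) (query : String) (max_len : Int) (out : String) : Prop := out = excerpt_memory_md_py_alt full_text query max_len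
instance (full_text : String) (query : String) (max_len : Int) (out : String) : Decidable (Spec_excerpt_memory_md_py full_text query max_len out) := by unfold Spec_excerpt_memory_md_py; infer_instance

-- ===== CLAIM (what is proved, stated in full; the proofs are below) =====
def Claim_equal_excerpt_memory_md_py : Prop := ∀ (full_text : String) (query : String) (max_len : Int), Dom_excerpt_memory_md_py full_text query max_len → Spec_excerpt_memory_md_py full_text query max_len (excerpt_memory_md_py full_text query max_len)

-- ===== LEMMAS AND PROOFS =====

-- insertBy walks past a block of elements that are all 'not before' x
theorem pvInsertBy_append {α : Type} (before : α → α → Bool) (x : α) (l1 l2 : List α)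
    (h : ∀ y ∈ l1, before x y = false) :
    PySem.List.insertBy before x (l1 ++ l2) = l1 ++ PySem.List.insertBy before x l2 := by
  induction l1 with
  | nil => simp
  | cons y ys ih =>
    have hy : before x y = false := h y (by simp)
    simp [PySem.List.insertBy, hy, ih (fun z hz => h z (by simp [hz]))]

-- inserting x (descending stable order) into a bucketed list appends it to its own bucket
theorem pvInsertBy_buckets {α : Type} (key : α → Int) (x : α) :
    ∀ (ds : List Int) (f : Int → List α),
    ds.Pairwise (· > ·) →
    (∀ d ∈ ds, ∀ y ∈ f d, key y = d) →
    key x ∈ ds →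
    PySem.List.insertBy (fun a b => decide (key b < key a)) x (ds.flatMap f)
      = ds.flatMap (fun d => f d ++ if key x = d then [x] else []) := by
  intro ds
  induction ds with
  | nil => intro f _ _ hx; simp at hx
  | cons d ds ih =>
    intro f hp hfk hx
    have hnotbefore : ∀ y ∈ f d, (fun a b => decide (key b < key a)) x y = false := by
      intro y hy
      have hky : key y = d := hfk d (by simp) y hy
      rcases List.mem_cons.mp hx with h | h
      · simp [hky, h]
      · have : key x < d := (List.pairwise_cons.mp hp).1 _ h
        simp [hky]; omega
    rw [List.flatMap_cons, List.flatMap_cons,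
        pvInsertBy_append _ _ _ _ hnotbefore]
    by_cases hxd : key x = d
    · have htail : PySem.List.insertBy (fun a b => decide (key b < key a)) x (ds.flatMap f)
          = x :: ds.flatMap f := by
        cases hds : ds.flatMap f with
        | nil => simp [PySem.List.insertBy]
        | cons y ys =>
          have hy : y ∈ ds.flatMap f := by simp [hds]
          rcases List.mem_flatMap.mp hy with ⟨d', hd', hyd'⟩
          have hky : key y = d' := hfk d' (by simp [hd']) y hyd'
          have hlt : d' < d := (List.pairwise_cons.mp hp).1 _ hd'
          have hb : (fun a b => decide (key b < key a)) x y = true := by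
            simp [hky, hxd]; omega
          simp [PySem.List.insertBy, hb]
      have hrest : ds.flatMap (fun d' => f d' ++ if key x = d' then [x] else [])
          = ds.flatMap f := by
        apply List.flatMap_congr
        intro d' hd'
        have hlt : d' < d := (List.pairwise_cons.mp hp).1 _ hd'
        have : key x ≠ d' := by omega
        simp [this]
      rw [htail, hrest]
      simp [hxd]
    · have hxds : key x ∈ ds := by
        rcases List.mem_cons.mp hx with h | h
        · exact absurd h hxd
        · exact h
      rw [ih f (List.pairwise_cons.mp hp).2 (fun d' hd' => hfk d' (by simp [hd'])) hxds]
      simp [hxd]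

-- Python's stable descending sort IS the concatenation of the score buckets, highest first
theorem pvSorted_buckets {α : Type} (key : α → Int) (ds : List Int)
    (hp : ds.Pairwise (· > ·)) :
    ∀ L : List α, (∀ x ∈ L, key x ∈ ds) →
    PySem.List.sorted L key true
      = ds.flatMap (fun d => L.filter (fun x => decide (key x = d))) := by
  intro L
  induction L using List.reverseRecOn with
  | nil => intro _; simp [PySem.List.sorted]
  | append_singleton L x ih =>
    intro hmem
    rw [PySem.List.sorted_rev_eq_foldl_insertBy, List.foldl_append]
    rw [← PySem.List.sorted_rev_eq_foldl_insertBy]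
    simp only [List.foldl_cons, List.foldl_nil]
    rw [ih (fun y hy => hmem y (by simp [hy]))]
    rw [pvInsertBy_buckets key x ds _ hp
        (fun d _ y hy => by simpa using (List.mem_filter.mp hy).2)
        (hmem x (by simp))]
    apply List.flatMap_congr
    intro d _
    rw [List.filter_append]
    congr 1
    by_cases h : key x = d <;> simp [h]

-- the inner pass at level s, followed by Rest, is A's greedy loop on (bucket s ++ Rest)
theorem pvInner_greedy (m s : Int) :
    ∀ (zs : List (String × Int)) (Rest : List (Int × String)) (st : List String × Int),
    pvGreedyA m (((zs.filter (fun z => decide (z.2 = s))).map (fun z => (z.2, z.1))) ++ Rest) st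
      = (let r := pvInnerB m s zs st; if r.2 then r.1 else pvGreedyA m Rest r.1) := by
  intro zs
  induction zs with
  | nil => intro Rest st; simp [pvInnerB]
  | cons z zs ih =>
    intro Rest st
    obtain ⟨para, sc⟩ := z
    obtain ⟨parts, total⟩ := st
    by_cases hsc : sc = s
    · subst hsc
      rw [List.filter_cons, if_pos (by simp)]
      simp only [List.map_cons, List.cons_append]
      by_cases hover : m < total + (para.length : Int)
      · have h1 : pvGreedyA m ((sc, para) :: (List.map (fun z => (z.2, z.1)) (List.filter (fun z => decide (z.2 = sc)) zs) ++ Rest)) (parts, total) = (parts, total) := by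
          simp [pvGreedyA, hover]
        have h2 : pvInnerB m sc ((para, sc) :: zs) (parts, total) = ((parts, total), true) := by
          simp [pvInnerB, hover]
        rw [h1, h2]
        simp
      · have h1 : pvGreedyA m ((sc, para) :: (List.map (fun z => (z.2, z.1)) (List.filter (fun z => decide (z.2 = sc)) zs) ++ Rest)) (parts, total)
            = pvGreedyA m (List.map (fun z => (z.2, z.1)) (List.filter (fun z => decide (z.2 = sc)) zs) ++ Rest) (parts ++ [para], total + (para.length : Int)) := by
          simp [pvGreedyA, hover]
        have h2 : pvInnerB m sc ((para, sc) :: zs) (parts, total)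
            = pvInnerB m sc zs (parts ++ [para], total + (para.length : Int)) := by
          simp [pvInnerB, hover]
        rw [h1, h2]
        simpa using ih Rest (parts ++ [para], total + PySem.Str.len para)
    · rw [List.filter_cons, if_neg (by simp [hsc])]
      have hinner : pvInnerB m s ((para, sc) :: zs) (parts, total)
          = pvInnerB m s zs (parts, total) := by
        simp [pvInnerB, hsc]
      rw [hinner]
      exact ih Rest (parts, total)

-- B's outer sweep is A's greedy loop on the concatenation of all buckets
theorem pvOuter_greedy (m : Int) (zs : List (String × Int)) :
    ∀ (ds : List Int) (st : List String × Int),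
    pvGreedyA m (ds.flatMap (fun d => (zs.filter (fun z => decide (z.2 = d))).map (fun z => (z.2, z.1)))) st
      = pvOuterB m zs ds st := by
  intro ds
  induction ds with
  | nil => intro st; simp [pvOuterB, pvGreedyA]
  | cons d ds ih =>
    intro st
    rw [List.flatMap_cons, pvInner_greedy]
    simp only [pvOuterB]
    by_cases h : (pvInnerB m d zs st).2 <;> simp [h, ih]

-- the zipped-and-filtered bucket of B equals the filtered scored bucket of A
theorem pvBucket_eq (ps : List String) (g : String → Int) (d : Int) :
    ((ps.zip (ps.map g)).filter (fun z => decide (z.2 = d))).map (fun z => (z.2, z.1))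
      = (ps.map (fun p => (g p, p))).filter (fun x => decide (x.1 = d)) := by
  rw [← List.map_prod_left_eq_zip, List.filter_map, List.filter_map]
  simp [Function.comp_def]

-- every score is one of len(query_words)+1 levels K, …, 1, 0
theorem pvScore_mem (qws : List String) (para : String) :
    pvScoreA qws para ∈ (PySem.List.pyRange 0 ((qws.length : Int) + 1) 1).reverse := by
  have hcast : ((qws.length : Int) + 1) = ((qws.length + 1 : Nat) : Int) := by push_cast; ring
  rw [hcast, PySem.List.pyRange_zero_natCast]
  have : pvScoreA qws para
      = ((qws.countP (fun w => PySem.Str.isIn w (PySem.Str.lower para)) : Nat) : Int) := by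
    simpa [pvScoreA] using PySem.List.sum_map_ite_one_zero
      (fun w => PySem.Str.isIn w (PySem.Str.lower para)) qws
  rw [this]
  simp only [List.mem_reverse, List.mem_map, List.mem_range]
  exact ⟨_, Nat.lt_succ_of_le List.countP_le_length, rfl⟩

-- the level list is strictly decreasing
theorem pvLevels_sorted (n : Nat) :
    ((PySem.List.pyRange 0 ((n : Int) + 1) 1).reverse).Pairwise (· > ·) := by
  have hcast : ((n : Int) + 1) = ((n + 1 : Nat) : Int) := by push_cast; ring
  rw [hcast, PySem.List.pyRange_zero_natCast, List.pairwise_reverse]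
  exact List.pairwise_lt_range.map _ (fun a b h => by exact_mod_cast h)

-- the two selection pipelines agree for any paragraph list and query-word list
theorem pvCore (qws ps : List String) (m : Int) :
    pvGreedyA m (PySem.List.sorted (ps.map (fun para => (pvScoreA qws para, para))) (fun x => x.1) true) ([], 0)
      = pvOuterB m (ps.zip (ps.map (fun p => pvScoreB qws p)))
          ((PySem.List.pyRange 0 ((qws.length : Int) + 1) 1).reverse) ([], 0) := by
  rw [pvSorted_buckets (fun x => x.1)
      ((PySem.List.pyRange 0 ((qws.length : Int) + 1) 1).reverse)
      (pvLevels_sorted qws.length)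
      (ps.map (fun para => (pvScoreA qws para, para)))
      (by
        intro x hx
        rcases List.mem_map.mp hx with ⟨p, _, rfl⟩
        exact pvScore_mem qws p)]
  rw [← pvOuter_greedy]
  congr 1
  apply List.flatMap_congr
  intro d _
  exact (pvBucket_eq ps (fun p => pvScoreA qws p) d).symm

-- ===== VERDICT (by name: the statement is the Claim_ definition above) =====
theorem excerpt_memory_md_py_spec : Claim_equal_excerpt_memory_md_py := by
  unfold Claim_equal_excerpt_memory_md_py
  intro full_text query max_len _
  unfold Spec_excerpt_memory_md_py excerpt_memory_md_py excerpt_memory_md_py_alt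
  by_cases hlen : PySem.Str.len full_text ≤ max_len
  · rw [if_pos hlen, if_pos hlen]
  · rw [if_neg hlen, if_neg hlen]
    dsimp only
    rw [pvCore]
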